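-- pv_equiv track=rewrite | github.com/GenRockeR/elan-agent | device_trackerd.py | ignoreIP
-- ===== SOURCE A (Python) =====
-- def ignoreIP(ip):
--     # Ignore broadcast
--     if ip[:6] == '0.0.0.' or ip in ('255.255.255.255', '::'):
--         return True
--     #Ignore multicast
--     if ip[:4] in [str(v)+'.' for v in range(224,239)]: # 224. to 239.
--         return True
--
--     if ip == '::':
--         return True
--
--     return False
-- ===== SOURCE B (Python) =====
-- def _insert(node, word, kind):
--     # Functional insertion of `word` into an immutable prefix trie.
--     # node = (prefix_accept, exact_accept, kids) ; kids = list of (char, subtrie)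
--     pre, exa, kids = node
--     if not word:
--         return (kind == 'p' or pre, kind == 'e' or exa, kids)
--     c, rest = word[0], word[1:]
--     if any(k == c for k, _ in kids):
--         newkids = [(k, _insert(t, rest, kind) if k == c else t) for k, t in kids]
--     else:
--         newkids = kids + [(c, _insert((False, False, []), rest, kind))]
--     return (pre, exa, newkids)
--
--
-- _TRIE = (False, False, [])
-- for _w in ['0.0.0.'] + [str(_v) + '.' for _v in range(224, 239)]:
--     _TRIE = _insert(_TRIE, _w, 'p')   # accept as soon as the prefix is seen
-- for _w in ['255.255.255.255', '::']:
--     _TRIE = _insert(_TRIE, _w, 'e')   # accept only the exact word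
--
--
-- def ignoreIP(ip):
--     # Single left-to-right walk over the precomputed trie.
--     node = _TRIE
--     for ch in ip:
--         pre, exa, kids = node
--         if pre:
--             return True
--         for k, t in kids:
--             if k == ch:
--                 node = t
--                 break
--         else:
--             return False
--     return node[0] or node[1]
-- ===== Notes on version B (the rewrite author's own statement) =====
-- stated objective: alternative
-- what changed: B precomputes (at module load) a prefix trie of the ignorable patterns ('0.0.0.' and '224.'..'238.' as accept-on-prefix entries, '255.255.255.255' and '::' as exact entries) and answers each call by a single left-to-right table-driven walk of the string, instead of A's per-call slice comparisons and membership scan of a freshly generated 15-element prefix-string list.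
import Mathlib
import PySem

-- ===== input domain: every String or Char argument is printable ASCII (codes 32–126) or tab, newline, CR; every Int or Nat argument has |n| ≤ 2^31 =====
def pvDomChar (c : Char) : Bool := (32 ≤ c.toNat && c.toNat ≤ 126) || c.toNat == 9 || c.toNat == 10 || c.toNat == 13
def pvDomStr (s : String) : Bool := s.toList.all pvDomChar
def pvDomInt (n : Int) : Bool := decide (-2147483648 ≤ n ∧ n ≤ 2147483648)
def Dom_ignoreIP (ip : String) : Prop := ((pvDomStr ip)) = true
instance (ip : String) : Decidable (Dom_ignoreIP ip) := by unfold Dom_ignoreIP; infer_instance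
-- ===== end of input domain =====

-- B replaces A's per-call string comparisons (a prefix slice, a generated 15-element
-- prefix list, equality tests) by a prefix trie built once and a single left-to-right
-- walk of the input (objective: alternative); return value only is claimed.

-- ===== PORT A =====
def ignoreIP (ip : String) : Bool :=
  -- if ip[:6] == '0.0.0.' or ip in ('255.255.255.255', '::'): return True
  if PySem.Str.slice ip none (some 6) = "0.0.0." ∨ ip = "255.255.255.255" ∨ ip = "::" then true
  -- if ip[:4] in [str(v)+'.' for v in range(224,239)]: return True
  else if ((PySem.List.pyRange 224 239 1).map (fun v => PySem.Int.toStr v ++ ".")).contains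
            (PySem.Str.slice ip none (some 4)) then true
  -- if ip == '::': return True
  else if ip = "::" then true
  else false

-- ===== PORT B =====
-- node = (prefix_accept, exact_accept, kids); kids is the association list of
-- (char, subtrie) pairs, encoded as the mutual pair PTrie/PKids (a nested
-- 'List (Char × PTrie)' field is not allowed in a single inductive).
mutual
inductive PTrie : Type where
  | node : Bool → Bool → PKids → PTrie
  deriving DecidableEq
inductive PKids : Type where
  | nil : PKids
  | cons : Char → PTrie → PKids → PKids
  deriving DecidableEq
end

-- any(k == c for k, _ in kids)
def kidsHas : PKids → Char → Bool
  | PKids.nil, _ => false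
  | PKids.cons k _ r, c => k == c || kidsHas r c

-- kids + [(c, t)]
def kidsAppend : PKids → Char → PTrie → PKids
  | PKids.nil, c, t => PKids.cons c t PKids.nil
  | PKids.cons k s r, c, t => PKids.cons k s (kidsAppend r c t)

-- [(k, f(t) if k == c else t) for k, t in kids]
def kidsMap : PKids → Char → (PTrie → PTrie) → PKids
  | PKids.nil, _, _ => PKids.nil
  | PKids.cons k t r, c, f => PKids.cons k (if k == c then f t else t) (kidsMap r c f)

-- _insert(node, word, kind); recursion on the word
def trieInsert : List Char → PTrie → String → PTrie
  | [], PTrie.node p e k, kind =>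
      PTrie.node (kind == "p" || p) (kind == "e" || e) k
  | c :: rest, PTrie.node p e k, kind =>
      if kidsHas k c then
        PTrie.node p e (kidsMap k c (fun t => trieInsert rest t kind))
      else
        PTrie.node p e (kidsAppend k c (trieInsert rest (PTrie.node false false PKids.nil) kind))

-- module-level construction of _TRIE (the two for-loops over the word lists)
def theTrie : PTrie :=
  (["255.255.255.255", "::"]).foldl (fun t w => trieInsert w.toList t "e")
    (("0.0.0." :: (PySem.List.pyRange 224 239 1).map (fun v => PySem.Int.toStr v ++ ".")).foldl
      (fun t w => trieInsert w.toList t "p") (PTrie.node false false PKids.nil))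

-- the inner 'for k, t in kids: if k == ch: … break / else: return False'
def kidsFind : PKids → Char → Option PTrie
  | PKids.nil, _ => none
  | PKids.cons k t r, c => if k == c then some t else kidsFind r c

-- the walk loop of ignoreIP
def trieWalk : PTrie → List Char → Bool
  | PTrie.node p e _, [] => p || e
  | PTrie.node p e k, c :: r =>
      if p then true
      else match kidsFind k c with
           | some t => trieWalk t r
           | none => false

def ignoreIP_alt (ip : String) : Bool := trieWalk theTrie ip.toList

-- ===== PRECONDITION & SPEC =====
def Spec_ignoreIP (ip : String) (out : Bool) : Prop := out = ignoreIP_alt ip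
instance (ip : String) (out : Bool) : Decidable (Spec_ignoreIP ip out) := by unfold Spec_ignoreIP; infer_instance

-- ===== CLAIM (what is proved, stated in full; the proofs are below) =====
def Claim_equal_ignoreIP : Prop := ∀ (ip : String), Dom_ignoreIP ip → Spec_ignoreIP ip (ignoreIP ip)

-- ===== LEMMAS AND PROOFS =====

-- the accepted-word table of a trie: one (path, prefix_accept, exact_accept) per node
mutual
def trieWords : PTrie → List (List Char × Bool × Bool)
  | PTrie.node p e k => ([], p, e) :: kidsWords k
def kidsWords : PKids → List (List Char × Bool × Bool)
  | PKids.nil => []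
  | PKids.cons c t r => (trieWords t).map (fun w => (c :: w.1, w.2)) ++ kidsWords r
end

def kidsChars : PKids → List Char
  | PKids.nil => []
  | PKids.cons c _ r => c :: kidsChars r

mutual
def trieWf : PTrie → Bool
  | PTrie.node _ _ k => decide (kidsChars k).Nodup && kidsWf k
def kidsWf : PKids → Bool
  | PKids.nil => true
  | PKids.cons _ t r => trieWf t && kidsWf r
end

def wordHit (cs : List Char) (w : List Char × Bool × Bool) : Bool :=
  (w.2.1 && PySem.Chars.startswith cs w.1) || (w.2.2 && decide (cs = w.1))

lemma startswith_nil_right (cs : List Char) : PySem.Chars.startswith cs [] = true :=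
  (PySem.Chars.startswith_iff _ _).mpr List.nil_prefix

lemma startswith_nil_cons (c : Char) (w : List Char) :
    PySem.Chars.startswith [] (c :: w) = false := by
  rw [← Bool.not_eq_true, PySem.Chars.startswith_iff]
  simp

lemma startswith_cons_cons (a c : Char) (r w : List Char) :
    PySem.Chars.startswith (a :: r) (c :: w)
      = ((c == a) && PySem.Chars.startswith r w) := by
  rw [Bool.eq_iff_iff]
  simp only [Bool.and_eq_true, beq_iff_eq, PySem.Chars.startswith_iff]
  exact List.cons_prefix_cons

lemma decide_cons_cons (a c : Char) (r w : List Char) :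
    decide (a :: r = c :: w) = ((c == a) && decide (r = w)) := by
  rw [Bool.eq_iff_iff]
  simp [eq_comm (a := c) (b := a)]

-- any of wordHit over a path-extended word table
lemma mapped_any_nil (L : List (List Char × Bool × Bool)) (c : Char) :
    L.any (wordHit [] ∘ fun w => (c :: w.1, w.2)) = false := by
  induction L with
  | nil => simp
  | cons w L ih => simp [wordHit, startswith_nil_cons, ih, Function.comp_apply]

lemma mapped_any_cons (L : List (List Char × Bool × Bool)) (c a : Char) (r : List Char) :
    L.any (wordHit (a :: r) ∘ fun w => (c :: w.1, w.2))
      = ((c == a) && L.any (wordHit r)) := by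
  induction L with
  | nil => simp
  | cons w L ih =>
      simp only [List.any_cons, ih, Function.comp_apply, wordHit, startswith_cons_cons,
        decide_cons_cons]
      cases hca : (c == a) <;> simp [Bool.and_or_distrib_left]

lemma kidsHas_false_iff : ∀ (k : PKids) (c : Char),
    kidsHas k c = false ↔ c ∉ kidsChars k
  | PKids.nil, c => by simp [kidsHas, kidsChars]
  | PKids.cons k0 t r, c => by
      simp [kidsHas, kidsChars, kidsHas_false_iff r c, Bool.or_eq_false_iff,
        eq_comm (a := k0) (b := c), not_or]

lemma kidsMap_not_has : ∀ (k : PKids) (c : Char) (f : PTrie → PTrie),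
    kidsHas k c = false → kidsMap k c f = k
  | PKids.nil, _, _, _ => rfl
  | PKids.cons k0 t r, c, f, h => by
      simp only [kidsHas, Bool.or_eq_false_iff] at h
      simp [kidsMap, h.1, kidsMap_not_has r c f h.2]

lemma kidsChars_map : ∀ (k : PKids) (c : Char) (f : PTrie → PTrie),
    kidsChars (kidsMap k c f) = kidsChars k
  | PKids.nil, _, _ => rfl
  | PKids.cons k0 t r, c, f => by simp [kidsMap, kidsChars, kidsChars_map r c f]

lemma kidsChars_append : ∀ (k : PKids) (c : Char) (t : PTrie),
    kidsChars (kidsAppend k c t) = kidsChars k ++ [c]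
  | PKids.nil, _, _ => rfl
  | PKids.cons k0 t0 r, c, t => by simp [kidsAppend, kidsChars, kidsChars_append r c t]

lemma kidsWords_append : ∀ (k : PKids) (c : Char) (t : PTrie),
    kidsWords (kidsAppend k c t)
      = kidsWords k ++ (trieWords t).map (fun w => (c :: w.1, w.2))
  | PKids.nil, c, t => by simp [kidsAppend, kidsWords]
  | PKids.cons k0 t0 r, c, t => by simp [kidsAppend, kidsWords, kidsWords_append r c t]

lemma kidsWf_append : ∀ (k : PKids) (c : Char) (t : PTrie),
    kidsWf k = true → trieWf t = true → kidsWf (kidsAppend k c t) = true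
  | PKids.nil, c, t, _, ht => by simp [kidsAppend, kidsWf, ht]
  | PKids.cons k0 t0 r, c, t, hk, ht => by
      simp only [kidsWf, Bool.and_eq_true] at hk
      simp [kidsAppend, kidsWf, hk.1, kidsWf_append r c t hk.2 ht]

mutual
lemma insert_wf : ∀ (w : List Char) (t : PTrie) (kind : String),
    trieWf t = true → trieWf (trieInsert w t kind) = true
  | [], PTrie.node p e k, kind, h => by
      simp only [trieInsert]
      simpa [trieWf] using h
  | c :: rest, PTrie.node p e k, kind, h => by
      simp only [trieWf, Bool.and_eq_true, decide_eq_true_eq] at h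
      by_cases hkh : kidsHas k c = true
      · simp only [trieInsert, hkh, if_pos, trieWf, Bool.and_eq_true, decide_eq_true_eq,
          kidsChars_map]
        exact ⟨h.1, insKids_wf k c rest kind h.2⟩
      · rw [Bool.not_eq_true] at hkh
        simp only [trieInsert, hkh, Bool.false_eq_true, if_neg, not_false_iff, trieWf,
          Bool.and_eq_true, decide_eq_true_eq, kidsChars_append]
        refine ⟨?_, kidsWf_append k c _ h.2 (insert_wf rest (PTrie.node false false PKids.nil) kind rfl)⟩
        rw [List.nodup_append]
        refine ⟨h.1, List.nodup_singleton c, ?_⟩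
        have hnotin := (kidsHas_false_iff k c).mp hkh
        intro a ha b hb
        have hbc : b = c := by simpa using hb
        exact fun hab => hnotin ((hbc ▸ hab : a = c) ▸ ha)
  termination_by w t kind => (w.length, 0)
lemma insKids_wf : ∀ (k : PKids) (c : Char) (rest : List Char) (kind : String),
    kidsWf k = true → kidsWf (kidsMap k c (fun t => trieInsert rest t kind)) = true
  | PKids.nil, _, _, _, _ => rfl
  | PKids.cons k0 t0 r, c, rest, kind, h => by
      simp only [kidsWf, Bool.and_eq_true] at h
      by_cases hk : (k0 == c) = true
      · simp only [kidsMap, hk, if_pos, kidsWf, Bool.and_eq_true]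
        exact ⟨insert_wf rest t0 kind h.1, insKids_wf r c rest kind h.2⟩
      · simp only [kidsMap, hk, Bool.false_eq_true, if_neg, not_false_iff, kidsWf,
          Bool.and_eq_true]
        exact ⟨h.1, insKids_wf r c rest kind h.2⟩
  termination_by k c rest kind => (rest.length, 1 + sizeOf k)
end

lemma empty_any (cs : List Char) :
    (trieWords (PTrie.node false false PKids.nil)).any (wordHit cs) = false := by
  simp [trieWords, kidsWords, wordHit]

mutual
lemma insert_any : ∀ (w : List Char) (t : PTrie) (kind : String) (cs : List Char),
    trieWf t = true →
    (trieWords (trieInsert w t kind)).any (wordHit cs)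
      = ((trieWords t).any (wordHit cs)
         || ((kind == "p") && PySem.Chars.startswith cs w)
         || ((kind == "e") && decide (cs = w)))
  | [], PTrie.node p e k, kind, cs, _ => by
      simp only [trieInsert, trieWords, List.any_cons, wordHit, startswith_nil_right]
      cases hkp : (kind == "p") <;> cases hke : (kind == "e") <;>
        cases hd : decide (cs = ([] : List Char)) <;> simp
  | c :: rest, PTrie.node p e k, kind, cs, h => by
      simp only [trieWf, Bool.and_eq_true, decide_eq_true_eq] at h
      by_cases hkh : kidsHas k c = true
      · simp only [trieInsert, hkh, if_pos, trieWords, List.any_cons,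
          insKids_any k c rest kind cs h.1 h.2 hkh]
        cases wordHit cs ([], p, e) <;> simp [Bool.or_assoc]
      · rw [Bool.not_eq_true] at hkh
        simp only [trieInsert, hkh, Bool.false_eq_true, if_neg, not_false_iff, trieWords,
          List.any_cons, kidsWords_append, List.any_append, List.any_map]
        cases cs with
        | nil =>
            simp [mapped_any_nil, startswith_nil_cons]
        | cons a r =>
            rw [mapped_any_cons, insert_any_aux rest kind r]
            simp only [startswith_cons_cons, decide_cons_cons]
            cases wordHit (a :: r) ([], p, e) <;> cases hca : (c == a) <;>
              simp [Bool.and_or_distrib_left, Bool.or_assoc]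
  termination_by w t kind cs => (w.length, 1)
lemma insert_any_aux : ∀ (rest : List Char) (kind : String) (r : List Char),
    (trieWords (trieInsert rest (PTrie.node false false PKids.nil) kind)).any (wordHit r)
      = (((kind == "p") && PySem.Chars.startswith r rest)
         || ((kind == "e") && decide (r = rest)))
  | rest, kind, r => by
      rw [insert_any rest (PTrie.node false false PKids.nil) kind r rfl, empty_any]
      simp
  termination_by rest kind r => (rest.length, 2)
lemma insKids_any : ∀ (k : PKids) (c : Char) (rest : List Char) (kind : String) (cs : List Char),
    (kidsChars k).Nodup → kidsWf k = true → kidsHas k c = true →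
    (kidsWords (kidsMap k c (fun t => trieInsert rest t kind))).any (wordHit cs)
      = ((kidsWords k).any (wordHit cs)
         || ((kind == "p") && PySem.Chars.startswith cs (c :: rest))
         || ((kind == "e") && decide (cs = c :: rest)))
  | PKids.nil, _, _, _, _, _, _, h => by simp [kidsHas] at h
  | PKids.cons k0 t0 r, c, rest, kind, cs, hnd, hwf, hhas => by
      simp only [kidsChars, List.nodup_cons] at hnd
      simp only [kidsWf, Bool.and_eq_true] at hwf
      by_cases hk : (k0 == c) = true
      · have hk' : k0 = c := beq_iff_eq.mp hk
        have hrest : kidsHas r c = false := by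
          rw [kidsHas_false_iff]
          exact hk' ▸ hnd.1
        simp only [kidsMap, hk, if_pos, kidsWords, List.any_append, List.any_map,
          kidsMap_not_has r c _ hrest]
        cases cs with
        | nil =>
            simp [mapped_any_nil, startswith_nil_cons]
        | cons a r' =>
            rw [mapped_any_cons, mapped_any_cons, insert_any rest t0 kind r' hwf.1]
            subst hk'
            simp only [startswith_cons_cons, decide_cons_cons]
            cases hca : (k0 == a) <;> cases (kidsWords r).any (wordHit (a :: r')) <;>
              simp [Bool.and_or_distrib_left, Bool.or_assoc]
      · have hhas' : kidsHas r c = true := by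
          simpa [kidsHas, hk] using hhas
        simp only [kidsMap, hk, Bool.false_eq_true, if_neg, not_false_iff, kidsWords,
          List.any_append, List.any_map, insKids_any r c rest kind cs hnd.2 hwf.2 hhas']
        cases (trieWords t0).any (wordHit cs ∘ fun w => (k0 :: w.1, w.2)) <;>
          simp [Bool.or_assoc]
  termination_by k c rest kind cs => (rest.length, 3 + sizeOf k)
end

lemma kidsWords_any_nil : ∀ (k : PKids), (kidsWords k).any (wordHit []) = false
  | PKids.nil => rfl
  | PKids.cons c t r => by
      simp [kidsWords, List.any_append, List.any_map, mapped_any_nil, kidsWords_any_nil r]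

lemma kidsFind_none_any : ∀ (k : PKids) (c : Char) (r : List Char),
    kidsFind k c = none → (kidsWords k).any (wordHit (c :: r)) = false
  | PKids.nil, _, _, _ => rfl
  | PKids.cons k0 t rest, c, r, h => by
      simp only [kidsFind] at h
      by_cases hk : (k0 == c) = true
      · simp [hk] at h
      · simp only [hk, Bool.false_eq_true, if_neg, not_false_iff] at h
        simp [kidsWords, List.any_append, List.any_map, mapped_any_cons, hk,
          kidsFind_none_any rest c r h]

lemma kidsFind_mem : ∀ (k : PKids) (c : Char) (t : PTrie),
    kidsFind k c = some t → c ∈ kidsChars k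
  | PKids.nil, _, _, h => by simp [kidsFind] at h
  | PKids.cons k0 t0 r, c, t, h => by
      simp only [kidsFind] at h
      by_cases hk : (k0 == c) = true
      · simp [kidsChars, beq_iff_eq.mp hk]
      · simp only [hk, Bool.false_eq_true, if_neg, not_false_iff] at h
        simp [kidsChars, kidsFind_mem r c t h]

lemma kidsFind_some_any : ∀ (k : PKids) (c : Char) (r : List Char) (t' : PTrie),
    (kidsChars k).Nodup → kidsFind k c = some t' →
    (kidsWords k).any (wordHit (c :: r)) = (trieWords t').any (wordHit r)
  | PKids.nil, _, _, _, _, h => by simp [kidsFind] at h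
  | PKids.cons k0 t rest, c, r, t', hnd, h => by
      simp only [kidsFind] at h
      simp only [kidsChars, List.nodup_cons] at hnd
      by_cases hk : (k0 == c) = true
      · simp only [hk, if_pos] at h
        obtain rfl : t = t' := by injection h
        have hrest : kidsFind rest c = none := by
          rcases hfind : kidsFind rest c with _ | t2
          · rfl
          · exact absurd ((beq_iff_eq.mp hk) ▸ kidsFind_mem rest c t2 hfind) hnd.1
        simp [kidsWords, List.any_append, List.any_map, mapped_any_cons, hk,
          kidsFind_none_any rest c r hrest]
      · simp only [hk, Bool.false_eq_true, if_neg, not_false_iff] at h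
        simp [kidsWords, List.any_append, List.any_map, mapped_any_cons, hk,
          kidsFind_some_any rest c r t' hnd.2 h]

lemma kidsFind_some_wf : ∀ (k : PKids) (c : Char) (t' : PTrie),
    kidsWf k = true → kidsFind k c = some t' → trieWf t' = true
  | PKids.nil, _, _, _, h => by simp [kidsFind] at h
  | PKids.cons k0 t rest, c, t', hwf, h => by
      simp only [kidsFind] at h
      simp only [kidsWf, Bool.and_eq_true] at hwf
      by_cases hk : (k0 == c) = true
      · simp only [hk, if_pos] at h
        obtain rfl : t = t' := by injection h
        exact hwf.1
      · simp only [hk, Bool.false_eq_true, if_neg, not_false_iff] at h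
        exact kidsFind_some_wf rest c t' hwf.2 h

lemma walk_words (cs : List Char) : ∀ (t : PTrie), trieWf t = true →
    trieWalk t cs = (trieWords t).any (wordHit cs) := by
  induction cs with
  | nil =>
      intro t _
      obtain ⟨p, e, k⟩ := t
      simp [trieWalk, trieWords, kidsWords_any_nil, wordHit, startswith_nil_right]
  | cons c r ih =>
      intro t hwf
      obtain ⟨p, e, k⟩ := t
      simp only [trieWf, Bool.and_eq_true, decide_eq_true_eq] at hwf
      have hroot : wordHit (c :: r) ([], p, e) = p := by
        simp [wordHit, startswith_nil_right]
      simp only [trieWalk, trieWords, List.any_cons, hroot]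
      by_cases hp : p = true
      · simp [hp]
      · simp only [hp, Bool.false_eq_true, if_neg, not_false_iff, Bool.false_or]
        rcases hfind : kidsFind k c with _ | t'
        · simp [kidsFind_none_any k c r hfind]
        · rw [kidsFind_some_any k c r t' hwf.1 hfind]
          exact ih t' (kidsFind_some_wf k c t' hwf.2 hfind)

lemma words_list_eval :
    ("0.0.0." :: (PySem.List.pyRange 224 239 1).map (fun v => PySem.Int.toStr v ++ "."))
      = ["0.0.0.", "224.", "225.", "226.", "227.", "228.", "229.", "230.", "231.", "232.", "233.", "234.", "235.", "236.", "237.", "238."] := by decide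

def U0 : PTrie := PTrie.node false false PKids.nil
def U1 : PTrie := trieInsert "0.0.0.".toList U0 "p"
def U2 : PTrie := trieInsert "224.".toList U1 "p"
def U3 : PTrie := trieInsert "225.".toList U2 "p"
def U4 : PTrie := trieInsert "226.".toList U3 "p"
def U5 : PTrie := trieInsert "227.".toList U4 "p"
def U6 : PTrie := trieInsert "228.".toList U5 "p"
def U7 : PTrie := trieInsert "229.".toList U6 "p"
def U8 : PTrie := trieInsert "230.".toList U7 "p"
def U9 : PTrie := trieInsert "231.".toList U8 "p"
def U10 : PTrie := trieInsert "232.".toList U9 "p"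
def U11 : PTrie := trieInsert "233.".toList U10 "p"
def U12 : PTrie := trieInsert "234.".toList U11 "p"
def U13 : PTrie := trieInsert "235.".toList U12 "p"
def U14 : PTrie := trieInsert "236.".toList U13 "p"
def U15 : PTrie := trieInsert "237.".toList U14 "p"
def U16 : PTrie := trieInsert "238.".toList U15 "p"
def U17 : PTrie := trieInsert "255.255.255.255".toList U16 "e"
def U18 : PTrie := trieInsert "::".toList U17 "e"

lemma theTrie_eq : theTrie = U18 := by
  unfold theTrie
  rw [words_list_eval]
  simp only [List.foldl]
  rfl

lemma wfU18 : trieWf U18 = true := by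
  have h0 : trieWf U0 = true := by decide
  have h1 : trieWf U1 = true := insert_wf "0.0.0.".toList U0 "p" h0
  have h2 : trieWf U2 = true := insert_wf "224.".toList U1 "p" h1
  have h3 : trieWf U3 = true := insert_wf "225.".toList U2 "p" h2
  have h4 : trieWf U4 = true := insert_wf "226.".toList U3 "p" h3
  have h5 : trieWf U5 = true := insert_wf "227.".toList U4 "p" h4
  have h6 : trieWf U6 = true := insert_wf "228.".toList U5 "p" h5
  have h7 : trieWf U7 = true := insert_wf "229.".toList U6 "p" h6
  have h8 : trieWf U8 = true := insert_wf "230.".toList U7 "p" h7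
  have h9 : trieWf U9 = true := insert_wf "231.".toList U8 "p" h8
  have h10 : trieWf U10 = true := insert_wf "232.".toList U9 "p" h9
  have h11 : trieWf U11 = true := insert_wf "233.".toList U10 "p" h10
  have h12 : trieWf U12 = true := insert_wf "234.".toList U11 "p" h11
  have h13 : trieWf U13 = true := insert_wf "235.".toList U12 "p" h12
  have h14 : trieWf U14 = true := insert_wf "236.".toList U13 "p" h13
  have h15 : trieWf U15 = true := insert_wf "237.".toList U14 "p" h14
  have h16 : trieWf U16 = true := insert_wf "238.".toList U15 "p" h15
  have h17 : trieWf U17 = true := insert_wf "255.255.255.255".toList U16 "e" h16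
  have h18 : trieWf U18 = true := insert_wf "::".toList U17 "e" h17
  exact h18

def mcastLits : List (List Char) :=
  ["224.","225.","226.","227.","228.","229.","230.","231.","232.","233.","234.","235.","236.","237.","238."].map String.toList

lemma alt_char (cs : List Char) :
    trieWalk theTrie cs
      = (PySem.Chars.startswith cs "0.0.0.".toList
         || mcastLits.any (fun m => PySem.Chars.startswith cs m)
         || decide (cs = "255.255.255.255".toList)
         || decide (cs = "::".toList)) := by
  rw [theTrie_eq, walk_words cs U18 wfU18]
  have h0 : trieWf U0 = true := by decide
  have h1 : trieWf U1 = true := insert_wf "0.0.0.".toList U0 "p" h0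
  have h2 : trieWf U2 = true := insert_wf "224.".toList U1 "p" h1
  have h3 : trieWf U3 = true := insert_wf "225.".toList U2 "p" h2
  have h4 : trieWf U4 = true := insert_wf "226.".toList U3 "p" h3
  have h5 : trieWf U5 = true := insert_wf "227.".toList U4 "p" h4
  have h6 : trieWf U6 = true := insert_wf "228.".toList U5 "p" h5
  have h7 : trieWf U7 = true := insert_wf "229.".toList U6 "p" h6
  have h8 : trieWf U8 = true := insert_wf "230.".toList U7 "p" h7
  have h9 : trieWf U9 = true := insert_wf "231.".toList U8 "p" h8
  have h10 : trieWf U10 = true := insert_wf "232.".toList U9 "p" h9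
  have h11 : trieWf U11 = true := insert_wf "233.".toList U10 "p" h10
  have h12 : trieWf U12 = true := insert_wf "234.".toList U11 "p" h11
  have h13 : trieWf U13 = true := insert_wf "235.".toList U12 "p" h12
  have h14 : trieWf U14 = true := insert_wf "236.".toList U13 "p" h13
  have h15 : trieWf U15 = true := insert_wf "237.".toList U14 "p" h14
  have h16 : trieWf U16 = true := insert_wf "238.".toList U15 "p" h15
  have h17 : trieWf U17 = true := insert_wf "255.255.255.255".toList U16 "e" h16
  rw [show U18 = trieInsert "::".toList U17 "e" from rfl,
    insert_any "::".toList U17 "e" cs h17,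
    show U17 = trieInsert "255.255.255.255".toList U16 "e" from rfl,
    insert_any "255.255.255.255".toList U16 "e" cs h16,
    show U16 = trieInsert "238.".toList U15 "p" from rfl,
    insert_any "238.".toList U15 "p" cs h15,
    show U15 = trieInsert "237.".toList U14 "p" from rfl,
    insert_any "237.".toList U14 "p" cs h14,
    show U14 = trieInsert "236.".toList U13 "p" from rfl,
    insert_any "236.".toList U13 "p" cs h13,
    show U13 = trieInsert "235.".toList U12 "p" from rfl,
    insert_any "235.".toList U12 "p" cs h12,
    show U12 = trieInsert "234.".toList U11 "p" from rfl,
    insert_any "234.".toList U11 "p" cs h11,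
    show U11 = trieInsert "233.".toList U10 "p" from rfl,
    insert_any "233.".toList U10 "p" cs h10,
    show U10 = trieInsert "232.".toList U9 "p" from rfl,
    insert_any "232.".toList U9 "p" cs h9,
    show U9 = trieInsert "231.".toList U8 "p" from rfl,
    insert_any "231.".toList U8 "p" cs h8,
    show U8 = trieInsert "230.".toList U7 "p" from rfl,
    insert_any "230.".toList U7 "p" cs h7,
    show U7 = trieInsert "229.".toList U6 "p" from rfl,
    insert_any "229.".toList U6 "p" cs h6,
    show U6 = trieInsert "228.".toList U5 "p" from rfl,
    insert_any "228.".toList U5 "p" cs h5,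
    show U5 = trieInsert "227.".toList U4 "p" from rfl,
    insert_any "227.".toList U4 "p" cs h4,
    show U4 = trieInsert "226.".toList U3 "p" from rfl,
    insert_any "226.".toList U3 "p" cs h3,
    show U3 = trieInsert "225.".toList U2 "p" from rfl,
    insert_any "225.".toList U2 "p" cs h2,
    show U2 = trieInsert "224.".toList U1 "p" from rfl,
    insert_any "224.".toList U1 "p" cs h1,
    show U1 = trieInsert "0.0.0.".toList U0 "p" from rfl,
    insert_any "0.0.0.".toList U0 "p" cs h0,
    show U0 = PTrie.node false false PKids.nil from rfl, empty_any]
  simp [mcastLits, Bool.or_assoc]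

lemma lits_eval :
    ((PySem.List.pyRange 224 239 1).map (fun v => PySem.Int.toStr v ++ ".")).map String.toList
      = mcastLits := by decide

lemma mem_lits_len : ∀ m ∈ mcastLits, m.length = 4 := by decide

lemma sw_take (cs m : List Char) (n : Nat) (hm : m.length = n) :
    PySem.Chars.startswith cs m = true ↔ cs.take n = m := by
  rw [PySem.Chars.startswith_iff, List.prefix_iff_eq_take, hm, eq_comm]

lemma any_lits (cs : List Char) :
    mcastLits.any (fun m => PySem.Chars.startswith cs m) = decide (cs.take 4 ∈ mcastLits) := by
  rw [Bool.eq_iff_iff, List.any_eq_true, decide_eq_true_iff]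
  constructor
  · rintro ⟨m, hm, hsw⟩
    exact ((sw_take cs m 4 (mem_lits_len m hm)).mp hsw) ▸ hm
  · intro h
    refine ⟨cs.take 4, h, ?_⟩
    rw [PySem.Chars.startswith_iff]
    exact List.take_prefix 4 cs

-- ===== VERDICT (by name: the statement is the Claim_ definition above) =====
theorem ignoreIP_spec : Claim_equal_ignoreIP := by
  intro ip _
  unfold Spec_ignoreIP ignoreIP ignoreIP_alt
  rw [alt_char ip.toList]
  have hslice6 : (PySem.Str.slice ip none (some 6)).toList = ip.toList.take 6 := by
    simp only [PySem.Str.toList_slice, PySem.Chars.slice_eq_listSlice]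
    rw [show ((6:Int) : Option Int) = some ((6:Nat):Int) by norm_num,
      PySem.List.slice_to_natCast]
  have hslice4 : (PySem.Str.slice ip none (some 4)).toList = ip.toList.take 4 := by
    simp only [PySem.Str.toList_slice, PySem.Chars.slice_eq_listSlice]
    rw [show ((4:Int) : Option Int) = some ((4:Nat):Int) by norm_num,
      PySem.List.slice_to_natCast]
  have hpref : (PySem.Str.slice ip none (some 6) = "0.0.0.")
      ↔ PySem.Chars.startswith ip.toList "0.0.0.".toList = true := by
    rw [← String.toList_inj, hslice6, sw_take ip.toList "0.0.0.".toList 6 (by decide)]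
  have hinj : Function.Injective String.toList := fun x y h => String.toList_inj.mp h
  have hmem : ((PySem.List.pyRange 224 239 1).map (fun v => PySem.Int.toStr v ++ ".")).contains
        (PySem.Str.slice ip none (some 4))
      = decide (ip.toList.take 4 ∈ mcastLits) := by
    rw [List.contains_eq_mem]
    apply decide_eq_decide.mpr
    rw [← List.mem_map_of_injective hinj, lits_eval, hslice4]
  by_cases h1 : PySem.Str.slice ip none (some 6) = "0.0.0." ∨ ip = "255.255.255.255" ∨ ip = "::"
  · rw [if_pos h1]
    rcases h1 with h | h | h
    · rw [hpref.mp h]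
      simp
    · rw [String.toList_inj.mpr h]
      simp
    · rw [String.toList_inj.mpr h]
      simp
  · rw [if_neg h1]
    push_neg at h1
    obtain ⟨hns, hn255, hncol⟩ := h1
    by_cases h2 : ((PySem.List.pyRange 224 239 1).map (fun v => PySem.Int.toStr v ++ ".")).contains
        (PySem.Str.slice ip none (some 4)) = true
    · rw [if_pos h2]
      rw [hmem] at h2
      rw [any_lits, h2]
      simp
    · rw [if_neg h2, if_neg hncol]
      have a1 : PySem.Chars.startswith ip.toList "0.0.0.".toList = false := by
        rw [Bool.eq_false_iff]
        intro hsw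
        exact hns (by
          rw [← String.toList_inj, hslice6]
          exact (sw_take ip.toList "0.0.0.".toList 6 (by decide)).mp hsw)
      have a2 : mcastLits.any (fun m => PySem.Chars.startswith ip.toList m) = false := by
        rw [any_lits, decide_eq_false_iff_not]
        intro hmemm
        exact h2 (by rw [hmem]; exact decide_eq_true hmemm)
      have a3 : decide (ip.toList = "255.255.255.255".toList) = false :=
        decide_eq_false (fun h => hn255 (String.toList_inj.mp h))
      have a4 : decide (ip.toList = "::".toList) = false :=
        decide_eq_false (fun h => hncol (String.toList_inj.mp h))
      rw [a1, a2, a3, a4]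
      rfl
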